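-- pv_equiv track=rewrite | github.com/asherif844/algorithms | firstNonRepeatingCharacter/exercise1.py | obtainDictionary
-- ===== SOURCE A (Python) =====
-- def obtainDictionary(string):
--     wordCount = {}
--     count = 0
--     for idx in range(len(string)):
--         if string[idx] not in wordCount:
--             wordCount[string[idx]] = 0
--         else:
--             wordCount[string[idx]] += 1
--     return wordCount
-- ===== SOURCE B (Python) =====
-- def obtainDictionary(string):
--     return {ch: string.count(ch) - 1 for ch in dict.fromkeys(string)}
-- ===== Notes on version B (the rewrite author's own statement) =====
-- stated objective: alternative
-- what changed: A's single conditional-increment hash pass is replaced by a no-counter design: take the distinct characters in first-occurrence order (dict.fromkeys) and, for each, rescan the string with str.count and store count - 1; nested scans instead of one incremental counting pass.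
import Mathlib
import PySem

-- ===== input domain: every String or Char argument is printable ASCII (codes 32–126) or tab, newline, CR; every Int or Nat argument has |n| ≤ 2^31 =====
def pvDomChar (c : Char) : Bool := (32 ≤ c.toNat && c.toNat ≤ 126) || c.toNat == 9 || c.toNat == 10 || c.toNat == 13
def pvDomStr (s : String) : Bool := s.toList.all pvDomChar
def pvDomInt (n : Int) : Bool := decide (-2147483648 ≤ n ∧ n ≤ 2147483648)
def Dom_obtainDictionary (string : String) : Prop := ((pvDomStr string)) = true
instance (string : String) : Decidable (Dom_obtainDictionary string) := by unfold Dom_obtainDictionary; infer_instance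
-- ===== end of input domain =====

-- B drops A's incremental counting pass entirely: it walks the distinct characters in
-- first-occurrence order and rescans the string with str.count for each (objective: alternative).

-- ===== PORT A =====
-- A: index loop over range(len(string)); a first occurrence is stored as 0, later ones increment.
def obtainDictionary (string : String) : List (String × Int) :=
  let cs := string.toList
  let wordCount :=
    (PySem.List.pyRange 0 (PySem.Str.len string) 1).foldl
      (fun d idx =>
        let ch := String.ofList [PySem.List.pyGetD cs idx ' ']
        if d.contains ch = false then d.insert ch 0
        else d.insert ch (d.getD ch 0 + 1))
      (PySem.Dict.empty : PySem.Dict String Int)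
  wordCount.items

-- ===== PORT B =====
-- B: for each distinct character (dict.fromkeys order) store string.count(ch) - 1.
def obtainDictionary_alt (string : String) : List (String × Int) :=
  ((PySem.List.dedup string.toList).foldl
    (fun d c =>
      d.insert (String.ofList [c]) ((PySem.Str.count string (String.ofList [c]) : Int) - 1))
    (PySem.Dict.empty : PySem.Dict String Int)).items

-- ===== PRECONDITION & SPEC =====
def Spec_obtainDictionary (string : String) (out : List (String × Int)) : Prop := out = obtainDictionary_alt string
instance (string : String) (out : List (String × Int)) : Decidable (Spec_obtainDictionary string out) := by unfold Spec_obtainDictionary; infer_instance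

-- ===== CLAIM =====
def Claim_equal_obtainDictionary : Prop := ∀ (string : String), Dom_obtainDictionary string → Spec_obtainDictionary string (obtainDictionary string)

-- ===== LEMMAS AND PROOFS =====

-- Closed form of A's loop over an arbitrary list of keys: the items are the distinct keys in
-- first-occurrence order, each paired with (number of occurrences) - 1.
theorem pv_A_items (ks : List String) :
    (ks.foldl
      (fun d x => if d.contains x = false then d.insert x 0
                  else d.insert x (d.getD x 0 + 1))
      (PySem.Dict.empty : PySem.Dict String Int)).items
    = (PySem.Set.ofList ks).map (fun k => (k, (ks.count k : Int) - 1)) := by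
  induction ks using List.reverseRecOn with
  | nil => rfl
  | append_singleton l x ih =>
    rw [List.foldl_append]
    generalize hd : l.foldl
      (fun d x => if d.contains x = false then d.insert x 0
                  else d.insert x (d.getD x 0 + 1)) (PySem.Dict.empty : PySem.Dict String Int) = d at ih ⊢
    have hkeys : d.keys = PySem.Set.ofList l := by
      rw [show d.keys = d.items.map Prod.fst from rfl, ih, List.map_map]
      have h1 : (Prod.fst ∘ fun k : String => (k, (l.count k : Int) - 1)) = id := rfl
      rw [h1, List.map_id]
    have hnd : d.keys.Nodup := by rw [hkeys]; exact PySem.Set.nodup_ofList l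
    have hcont : d.contains x = decide (x ∈ PySem.Set.ofList l) := by
      rw [PySem.Dict.contains_eq_decide_mem_keys, hkeys]
    by_cases hx : x ∈ l
    · have hmem : x ∈ PySem.Set.ofList l := (PySem.Set.mem_ofList l x).mpr hx
      have hc : d.contains x = true := by simp [hcont, hmem]
      have hget : d.getD x 0 = (l.count x : Int) - 1 := by
        apply PySem.Dict.getD_of_mem_items
        · rw [ih]; exact List.mem_map_of_mem hmem
        · exact hnd
      simp only [List.foldl_cons, List.foldl_nil, hc]
      simp only [Bool.true_eq_false, if_false, hget]
      rw [PySem.Dict.items_insert_of_contains d _ hc, ih, List.map_map,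
          PySem.Set.ofList_append_singleton, PySem.Set.add_of_mem hmem]
      apply List.map_congr_left
      intro k hk
      by_cases hkx : k = x
      · subst hkx
        simp [List.count_append]
      · have hb : (k == x) = false := beq_eq_false_iff_ne.mpr hkx
        simp only [Function.comp_apply, hb, Bool.false_eq_true, if_false]
        have hcnt : List.count k (l ++ [x]) = List.count k l := by
          have h0 : List.count k [x] = 0 := List.count_eq_zero.mpr (by simp [hkx])
          simp [List.count_append, h0]
        rw [hcnt]
    · have hmem : x ∉ PySem.Set.ofList l := fun h => hx ((PySem.Set.mem_ofList l x).mp h)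
      have hc : d.contains x = false := by simp [hcont, hmem]
      simp only [List.foldl_cons, List.foldl_nil, hc, if_true]
      rw [PySem.Dict.items_insert_of_not_contains d _ hc, ih,
          PySem.Set.ofList_append_singleton, PySem.Set.add_of_not_mem hmem,
          List.map_append]
      congr 1
      · apply List.map_congr_left
        intro k hk
        have hkx : k ≠ x := fun h => hmem (h ▸ hk)
        have hcnt : List.count k (l ++ [x]) = List.count k l := by
          have h0 : List.count k [x] = 0 := List.count_eq_zero.mpr (by simp [hkx])
          simp [List.count_append, h0]
        rw [hcnt]
      · simp [List.count_append, List.count_eq_zero_of_not_mem hx]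

-- str.count with a single-character needle counts that character.
theorem pv_count_go_single (c : Char) :
    ∀ (fuel : Nat) (l : List Char) (acc : Nat), l.length ≤ fuel →
      PySem.Chars.count.go [c] fuel l acc = acc + l.count c := by
  intro fuel
  induction fuel with
  | zero =>
    intro l acc h
    have : l = [] := List.eq_nil_of_length_eq_zero (Nat.le_zero.mp h)
    subst this; rfl
  | succ n ih =>
    intro l acc h
    cases l with
    | nil => rfl
    | cons a t =>
      rw [PySem.Chars.count.go]
      simp only [List.isPrefixOf, Bool.and_true]
      by_cases hca : c = a
      · subst hca
        simp only [BEq.rfl, if_true]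
        have hlen : t.length ≤ n := by simpa using h
        simp only [List.length_cons, List.length_nil, List.drop_succ_cons, List.drop_zero]
        rw [ih t (acc + 1) hlen]
        simp
        omega
      · have hb : (c == a) = false := beq_eq_false_iff_ne.mpr hca
        rw [hb]
        simp only [Bool.false_eq_true, if_false]
        have hlen : t.length ≤ n := by simpa using h
        rw [ih t acc hlen]
        have : (a == c) = false := beq_eq_false_iff_ne.mpr (fun h => hca h.symm)
        simp [List.count_cons, this]

theorem pv_chars_count_single (l : List Char) (c : Char) :
    PySem.Chars.count l [c] = l.count c := by
  rw [PySem.Chars.count]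
  simp only [List.isEmpty_cons, Bool.false_eq_true, if_false]
  have := pv_count_go_single c l.length l 0 (le_refl _)
  omega

theorem pv_ofList_singleton_inj : Function.Injective (fun c : Char => String.ofList [c]) := by
  intro a b h
  have := congrArg String.toList h
  simpa using this

theorem pv_set_ofList_map {α β : Type} [DecidableEq α] [DecidableEq β]
    (f : α → β) (hf : Function.Injective f) (l : List α) :
    PySem.Set.ofList (l.map f) = (PySem.Set.ofList l).map f := by
  induction l using List.reverseRecOn with
  | nil => rfl
  | append_singleton t x ih =>
    rw [List.map_append, List.map_singleton, PySem.Set.ofList_append_singleton,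
        PySem.Set.ofList_append_singleton, ih]
    by_cases hx : x ∈ PySem.Set.ofList t
    · have hfx : f x ∈ (PySem.Set.ofList t).map f := List.mem_map_of_mem hx
      rw [PySem.Set.add_of_mem hfx, PySem.Set.add_of_mem hx]
    · have hfx : f x ∉ (PySem.Set.ofList t).map f := by
        intro h
        obtain ⟨y, hy, hxy⟩ := List.mem_map.mp h
        exact hx (hf hxy ▸ hy)
      rw [PySem.Set.add_of_not_mem hfx, PySem.Set.add_of_not_mem hx, List.map_append,
          List.map_singleton]

theorem pv_eq (string : String) : obtainDictionary string = obtainDictionary_alt string := by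
  unfold obtainDictionary obtainDictionary_alt
  -- A side: turn the index loop into a fold over the characters, then use pv_A_items.
  have hA := PySem.List.foldl_pyRange_zero_pyGetD' string.toList ' '
      (fun d c => if d.contains (String.ofList [c]) = false then d.insert (String.ofList [c]) 0
                  else d.insert (String.ofList [c]) (d.getD (String.ofList [c]) 0 + 1))
      (PySem.Dict.empty : PySem.Dict String Int)
  simp only [PySem.Str.len_eq]
  simp only [hA]
  rw [show string.toList.foldl
        (fun d c => if d.contains (String.ofList [c]) = false then d.insert (String.ofList [c]) 0
                    else d.insert (String.ofList [c]) (d.getD (String.ofList [c]) 0 + 1))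
        (PySem.Dict.empty : PySem.Dict String Int)
      = (string.toList.map (fun c => String.ofList [c])).foldl
        (fun d x => if d.contains x = false then d.insert x 0
                    else d.insert x (d.getD x 0 + 1))
        (PySem.Dict.empty : PySem.Dict String Int) from
        (List.foldl_map (f := fun c => String.ofList [c])
          (g := fun (d : PySem.Dict String Int) x => if d.contains x = false then d.insert x 0
                           else d.insert x (d.getD x 0 + 1))
          (l := string.toList) (init := PySem.Dict.empty)).symm]
  rw [pv_A_items]
  -- B side: every key inserted into the empty dict is fresh, so the items append in order.
  have hnodup : ((PySem.List.dedup string.toList).map (fun c => String.ofList [c])).Nodup := by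
    apply List.Nodup.map pv_ofList_singleton_inj
    simp only [PySem.List.dedup_eq_ofList]
    exact PySem.Set.nodup_ofList string.toList
  rw [PySem.Dict.items_foldl_insert_fresh
        (k := fun c => String.ofList [c])
        (v := fun c => ((PySem.Str.count string (String.ofList [c]) : Int) - 1))
        (d := (PySem.Dict.empty : PySem.Dict String Int))
        (l := PySem.List.dedup string.toList)
        (fun a _ => rfl) hnodup]
  -- Align the two closed forms.
  rw [pv_set_ofList_map _ pv_ofList_singleton_inj, List.map_map]
  simp only [PySem.List.dedup_eq_ofList]
  apply List.map_congr_left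
  intro c _
  simp only [Function.comp_apply]
  congr 1
  have hcnt : (string.toList.map (fun c => String.ofList [c])).count (String.ofList [c])
      = string.toList.count c := List.count_map_of_injective _ _ pv_ofList_singleton_inj c
  rw [hcnt]
  have : PySem.Str.count string (String.ofList [c]) = string.toList.count c := by
    rw [PySem.Str.count_eq]
    simpa using pv_chars_count_single string.toList c
  rw [this]

-- ===== VERDICT =====
theorem obtainDictionary_spec : Claim_equal_obtainDictionary := by
  intro string _
  unfold Spec_obtainDictionary
  exact pv_eq string
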